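-- pv_equiv track=rewrite | github.com/yangtianyinying/GraphColoringProblem | doc/CSPLatex/analysis-3/code/analysis-3.py | rooted_canonical_form
-- ===== SOURCE A (Python) =====
-- from itertools import combinations, permutations, product
--
-- def edges_from_adjacency(adjacency: tuple[tuple[int, ...], ...]) -> tuple[tuple[int, int], ...]:
--     return tuple(
--         (node, neighbor)
--         for node in range(len(adjacency))
--         for neighbor in adjacency[node]
--         if node < neighbor
--     )
--
-- def edge_key_after_permutation(
--     adjacency: tuple[tuple[int, ...], ...],
--     permutation: tuple[int, ...],
-- ) -> tuple[tuple[int, int], ...]: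
--     inverse = {old_index: new_index for new_index, old_index in enumerate(permutation)}
--     edges = []
--     for left, right in edges_from_adjacency(adjacency):
--         new_left = inverse[left]
--         new_right = inverse[right]
--         edges.append((min(new_left, new_right), max(new_left, new_right)))
--     return tuple(sorted(edges))
--
-- def adjacency_from_edge_key(
--     n_nodes: int,
--     edge_key: tuple[tuple[int, int], ...],
-- ) -> tuple[tuple[int, ...], ...]:
--     adjacency_sets = [set() for _ in range(n_nodes)]
--     for left, right in edge_key:
--         adjacency_sets[left].add(right)
--         adjacency_sets[right].add(left)
--     return tuple(tuple(sorted(neighbors)) for neighbors in adjacency_sets)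
--
-- def rooted_canonical_form(
--     adjacency: tuple[tuple[int, ...], ...],
--     root: int,
-- ) -> tuple[tuple[tuple[int, int], ...], tuple[tuple[int, ...], ...]]:
--     others = tuple(node for node in range(len(adjacency)) if node != root)
--     best_key: tuple[tuple[int, int], ...] | None = None
--     best_adjacency: tuple[tuple[int, ...], ...] | None = None
--     for remainder in permutations(others):
--         permutation = (root,) + remainder
--         key = edge_key_after_permutation(adjacency, permutation)
--         if best_key is not None and key >= best_key:
--             continue
--         best_key = key
--         best_adjacency = adjacency_from_edge_key(len(adjacency), key)
--     return best_key, best_adjacency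
-- ===== SOURCE B (Python) =====
-- from itertools import permutations
--
-- def rooted_canonical_form(adjacency, root):
--     n = len(adjacency)
--     edges = [(u, v) for u in range(n) for v in adjacency[u] if u < v]
--     pairs = [(a, b) for a in range(n) for b in range(a + 1, n)]
--     base = len(edges) + 1
--     others = [node for node in range(n) if node != root]
--     # encode each relabelled graph as one radix-(base) integer over the pair
--     # positions (most significant = pair (0,1)); the lexicographically smallest
--     # edge key is exactly the LARGEST such integer, so the loop is a running max
--     # of plain ints -- no per-permutation sorting, no tuple comparisons.
--     best = -1
--     for remainder in permutations(others):
--         pos = [0] * n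
--         for i, old in enumerate(remainder):
--             pos[old] = i + 1
--         counts = {}
--         for u, v in edges:
--             a, b = pos[u], pos[v]
--             p = (a, b) if a <= b else (b, a)
--             counts[p] = counts.get(p, 0) + 1
--         mask = 0
--         for p in pairs:
--             mask = mask * base + counts.get(p, 0)
--         if best < mask:
--             best = mask
--     # decode the winning radix number back into the canonical edge key
--     key = []
--     for p in reversed(pairs):
--         best, c = divmod(best, base)
--         key = [p] * c + key
--     key = tuple(key)
--     best_adjacency = tuple(
--         tuple(sorted({b if a == w else a for a, b in key if w in (a, b)}))
--         for w in range(n))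
--     return key, best_adjacency
-- ===== Notes on version B (the rewrite author's own statement) =====
-- stated objective: alternative
-- what changed: B encodes each relabelled graph as a single radix integer over the ordered vertex-pair slots (digit = edge multiplicity), so the search becomes a running MAX of plain ints instead of A's lexicographic tuple-list comparisons with per-permutation sorting and per-improvement adjacency rebuilds; the winning integer is decoded by divmod back into the edge key once, and the adjacency is reconstructed once at the end.
-- outside the precondition, e.g. on rooted_canonical_form(((2,), ()), 2): A returns (((0, 1),), ((1,), (0,))), B raises IndexError
import Mathlib
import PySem

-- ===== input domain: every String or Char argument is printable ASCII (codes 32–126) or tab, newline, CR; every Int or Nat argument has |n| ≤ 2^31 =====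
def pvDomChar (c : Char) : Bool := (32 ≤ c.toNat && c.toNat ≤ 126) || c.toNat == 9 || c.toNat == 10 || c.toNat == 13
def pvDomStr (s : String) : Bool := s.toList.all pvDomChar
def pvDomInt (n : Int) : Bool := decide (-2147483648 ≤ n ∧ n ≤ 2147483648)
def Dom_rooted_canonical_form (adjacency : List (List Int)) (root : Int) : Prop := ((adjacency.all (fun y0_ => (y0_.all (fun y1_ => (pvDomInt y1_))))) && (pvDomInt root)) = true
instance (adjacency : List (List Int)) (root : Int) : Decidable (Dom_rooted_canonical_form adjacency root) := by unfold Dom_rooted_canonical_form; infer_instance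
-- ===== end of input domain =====

-- B replaces A's sorted-edge-tuple minimization (per-permutation sort, lexicographic
-- tuple comparisons, per-improvement adjacency rebuild) by a radix-integer encoding of
-- each relabelled graph (digit per ordered vertex pair = edge multiplicity): the search
-- is a running max of plain ints, decoded once by divmod into the edge key at the end
-- (objective: alternative).

-- ===== PORT A =====
-- Python tuple comparison on keys (lexicographic; shorter tuple is smaller)
def pvPairLt (a b : Int × Int) : Bool := a.1 < b.1 || (a.1 == b.1 && a.2 < b.2)

def pvKeyGe : List (Int × Int) → List (Int × Int) → Bool
  | _, [] => true
  | [], _ :: _ => false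
  | a :: as, b :: bs => pvPairLt b a || (a == b && pvKeyGe as bs)

def pvEdgesFromAdjacency (adjacency : List (List Int)) : List (Int × Int) :=
  (PySem.List.pyRange 0 (adjacency.length : Int) 1).flatMap (fun node =>
    ((PySem.List.pyGetD adjacency node []).filter (fun nb => decide (node < nb))).map
      (fun nb => (node, nb)))

def pvEdgeKeyAfterPermutation (adjacency : List (List Int)) (permutation : List Int) :
    List (Int × Int) :=
  let inverse : PySem.Dict Int Int :=
    (PySem.List.enumerate permutation).foldl (fun d p => d.insert p.2 p.1) PySem.Dict.empty
  let edges : List (Int × Int) :=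
    (pvEdgesFromAdjacency adjacency).foldl (fun acc lr =>
      let newLeft := inverse.getD lr.1 0
      let newRight := inverse.getD lr.2 0
      acc ++ [(min newLeft newRight, max newLeft newRight)]) []
  PySem.List.sorted2 edges Prod.fst Prod.snd

def pvAdjacencyFromEdgeKey (nNodes : Int) (edgeKey : List (Int × Int)) : List (List Int) :=
  let sets0 : List (PySem.Set Int) := (PySem.List.pyRange 0 nNodes 1).map (fun _ => PySem.Set.empty)
  let sets := edgeKey.foldl (fun sets lr =>
    (sets.modify lr.1.toNat (fun s => PySem.Set.add s lr.2)).modify lr.2.toNat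
      (fun s => PySem.Set.add s lr.1)) sets0
  sets.map (fun s => PySem.List.sorted s (fun x => x) false)

def pvStep (n : Int) (best : Option (List (Int × Int)) × Option (List (List Int)))
    (key : List (Int × Int)) : Option (List (Int × Int)) × Option (List (List Int)) :=
  match best.1 with
  | some bestKey => if pvKeyGe key bestKey then best
      else (some key, some (pvAdjacencyFromEdgeKey n key))
  | none => (some key, some (pvAdjacencyFromEdgeKey n key))

def rooted_canonical_form (adjacency : List (List Int)) (root : Int) :
    (List (Int × Int)) × List (List Int) :=
  let others := (PySem.List.pyRange 0 (adjacency.length : Int) 1).filter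
    (fun node => decide (node ≠ root))
  let res := (PySem.List.permutations others others.length).foldl
    (fun best remainder =>
      pvStep (adjacency.length : Int) best
        (pvEdgeKeyAfterPermutation adjacency (root :: remainder)))
    ((none, none) : Option (List (Int × Int)) × Option (List (List Int)))
  (res.1.getD [], res.2.getD [])


-- ===== PORT B =====
def rooted_canonical_form_alt (adjacency : List (List Int)) (root : Int) :
    (List (Int × Int)) × List (List Int) :=
  let n := (adjacency.length : Int)
  let edges := (PySem.List.pyRange 0 n 1).flatMap (fun u =>
    ((PySem.List.pyGetD adjacency u []).filter (fun v => decide (u < v))).map (fun v => (u, v)))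
  let pairs := (PySem.List.pyRange 0 n 1).flatMap (fun a =>
    (PySem.List.pyRange (a + 1) n 1).map (fun b => (a, b)))
  let base := (edges.length : Int) + 1
  let others := (PySem.List.pyRange 0 n 1).filter (fun node => decide (node ≠ root))
  let best := (PySem.List.permutations others others.length).foldl
    (fun best remainder =>
      let pos := (PySem.List.enumerate remainder 0).foldl
        (fun pos p => PySem.List.pySetD pos p.2 (p.1 + 1)) (List.replicate n.toNat (0 : Int))
      let counts := edges.foldl (fun d uv =>
        let a := PySem.List.pyGetD pos uv.1 0
        let b := PySem.List.pyGetD pos uv.2 0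
        let p := if a ≤ b then (a, b) else (b, a)
        d.insert p (d.getD p 0 + 1)) (PySem.Dict.empty : PySem.Dict (Int × Int) Int)
      let mask := pairs.foldl (fun m p => m * base + counts.getD p 0) (0 : Int)
      if best < mask then mask else best) (-1 : Int)
  let decoded := pairs.reverse.foldl
    (fun (st : Int × List (Int × Int)) p =>
      (PySem.Int.floordiv st.1 base,
        List.replicate (PySem.Int.mod st.1 base).toNat p ++ st.2))
    (best, ([] : List (Int × Int)))
  let key := decoded.2
  let best_adjacency := (PySem.List.pyRange 0 n 1).map (fun w =>
    PySem.List.sorted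
      (PySem.Set.ofList ((key.filter (fun p => p.1 == w || p.2 == w)).map
        (fun p => if p.1 == w then p.2 else p.1)))
      (fun x => x) false)
  (key, best_adjacency)


-- ===== PRECONDITION & SPEC =====
-- Pre_ requires every forward neighbour entry to be a valid node, and the root to be a node of
-- the graph unless the graph has no forward edges at all: outside this, A raises
-- KeyError/IndexError on most inputs, and on the rest (an out-of-range root whose shifted
-- labels happen never to reach a rebuilt index) its value is accidental.
def Pre_rooted_canonical_form (adjacency : List (List Int)) (root : Int) : Prop :=
  (∀ p ∈ adjacency.zipIdx, ∀ v ∈ p.1, (p.2 : Int) < v → v < (adjacency.length : Int)) ∧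
  ((0 ≤ root ∧ root < (adjacency.length : Int)) ∨
    ∀ p ∈ adjacency.zipIdx, ∀ v ∈ p.1, ¬ ((p.2 : Int) < v))
instance (adjacency : List (List Int)) (root : Int) :
    Decidable (Pre_rooted_canonical_form adjacency root) := by
  unfold Pre_rooted_canonical_form; infer_instance

def pvWitness_rooted_canonical_form : List (List Int) × Int := ([[1], [0], []], 0)

def Spec_rooted_canonical_form (adjacency : List (List Int)) (root : Int)
    (out : (List (Int × Int)) × List (List Int)) : Prop :=
  out = rooted_canonical_form_alt adjacency root
instance (adjacency : List (List Int)) (root : Int) (out : (List (Int × Int)) × List (List Int)) :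
    Decidable (Spec_rooted_canonical_form adjacency root out) := by
  unfold Spec_rooted_canonical_form; infer_instance

-- ===== CLAIM (what is proved, stated in full; the proofs are below) =====
def Claim_equal_rooted_canonical_form : Prop :=
  ∀ (adjacency : List (List Int)) (root : Int), Dom_rooted_canonical_form adjacency root →
    Pre_rooted_canonical_form adjacency root →
    Spec_rooted_canonical_form adjacency root (rooted_canonical_form adjacency root)

-- ===== LEMMAS AND PROOFS =====

-- strict lexicographic order on key lists (Python tuple '<'), proof-side only
def pvKeyLt : List (Int × Int) → List (Int × Int) → Bool
  | [], [] => false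
  | [], _ :: _ => true
  | _ :: _, [] => false
  | a :: as, b :: bs => pvPairLt a b || (a == b && pvKeyLt as bs)

lemma pv_pairLt_irrefl (a : Int × Int) : pvPairLt a a = false := by
  simp [pvPairLt]

lemma pv_pairLt_cases (a b : Int × Int) :
    pvPairLt a b = true ∨ a = b ∨ pvPairLt b a = true := by
  rcases a with ⟨a1, a2⟩; rcases b with ⟨b1, b2⟩
  simp [pvPairLt, Prod.ext_iff]
  omega

lemma pv_pairLt_asymm {a b : Int × Int} (h : pvPairLt a b = true) : pvPairLt b a = false := by
  rcases a with ⟨a1, a2⟩; rcases b with ⟨b1, b2⟩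
  simp [pvPairLt] at h ⊢
  omega

lemma pv_pairLt_trans {a b c : Int × Int} (h1 : pvPairLt a b = true) (h2 : pvPairLt b c = true) :
    pvPairLt a c = true := by
  rcases a with ⟨a1, a2⟩; rcases b with ⟨b1, b2⟩; rcases c with ⟨c1, c2⟩
  simp [pvPairLt] at h1 h2 ⊢
  omega

lemma pv_pairLt_ne {a b : Int × Int} (h : pvPairLt a b = true) : a ≠ b := by
  rintro rfl; simp [pv_pairLt_irrefl] at h

lemma pv_keyGe_eq_not_keyLt : ∀ x y : List (Int × Int), pvKeyGe x y = !pvKeyLt x y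
  | [], [] => by simp [pvKeyGe, pvKeyLt]
  | [], _ :: _ => by simp [pvKeyGe, pvKeyLt]
  | _ :: _, [] => by simp [pvKeyGe, pvKeyLt]
  | a :: as, b :: bs => by
    simp only [pvKeyGe, pvKeyLt, pv_keyGe_eq_not_keyLt as bs]
    rcases pv_pairLt_cases a b with h | h | h
    · simp [h, pv_pairLt_asymm h, pv_pairLt_ne h]
    · subst h; simp [pv_pairLt_irrefl]
    · simp [h, pv_pairLt_asymm h, (pv_pairLt_ne h).symm]

-- helper: total getD with nonneg index
lemma pv_pyGetD_nonneg {α : Type} {xs : List α} {i : Int} (d : α) (h : 0 ≤ i) :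
    PySem.List.pyGetD xs i d = xs.getD i.toNat d := by
  simp [PySem.List.pyGetD, PySem.List.pyGet?_of_nonneg xs h, List.getD_eq_getElem?_getD]

-- ===== the relabelling position array and its lookup =====

def pvPOS (n : Nat) (rem : List Int) : List Int :=
  (PySem.List.enumerate rem 0).foldl
    (fun pos p => PySem.List.pySetD pos p.2 (p.1 + 1)) (List.replicate n (0 : Int))

def pvRelabelF (pos : List Int) (uv : Int × Int) : Int × Int :=
  let a := PySem.List.pyGetD pos uv.1 0
  let b := PySem.List.pyGetD pos uv.2 0
  if a ≤ b then (a, b) else (b, a)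

def pvL (n : Nat) (edges : List (Int × Int)) (rem : List Int) : List (Int × Int) :=
  edges.map (pvRelabelF (pvPOS n rem))

def pvPairsL (n : Int) : List (Int × Int) :=
  (PySem.List.pyRange 0 n 1).flatMap (fun a =>
    (PySem.List.pyRange (a + 1) n 1).map (fun b => (a, b)))

def pvRep (c : (Int × Int) → Nat) (P : List (Int × Int)) : List (Int × Int) :=
  P.flatMap (fun p => List.replicate (c p) p)

def pvVal (base : Int) (c : (Int × Int) → Nat) : List (Int × Int) → Int
  | [] => 0
  | p :: P => (c p : Int) * base ^ P.length + pvVal base c P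

-- see previous: the inverse dict lookups equal the position-array lookups
lemma pv_shift : ∀ (rem : List Int) (s : Int) (pos : List Int),
    (PySem.List.enumerate rem s).foldl
        (fun pos p => PySem.List.pySetD pos p.2 (p.1 + 1)) pos
      = (PySem.List.enumerate rem (s + 1)).foldl
        (fun pos p => PySem.List.pySetD pos p.2 p.1) pos
  | [], s, pos => by simp [PySem.List.enumerate_nil]
  | x :: rest, s, pos => by
    simp only [PySem.List.enumerate_cons, List.foldl_cons]
    exact pv_shift rest (s + 1) (PySem.List.pySetD pos x (s + 1))

lemma pv_bisim (n : Nat) :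
    ∀ (rem : List Int) (s : Int) (d : PySem.Dict Int Int) (pos : List Int),
    pos.length = n →
    (∀ u : Int, 0 ≤ u → d.getD u 0 = PySem.List.pyGetD pos u 0) →
    (∀ x ∈ rem, 0 ≤ x ∧ x < (n : Int)) →
    ∀ u : Int, 0 ≤ u →
    ((PySem.List.enumerate rem s).foldl (fun d p => d.insert p.2 p.1) d).getD u 0
      = PySem.List.pyGetD
          ((PySem.List.enumerate rem s).foldl
            (fun pos p => PySem.List.pySetD pos p.2 p.1) pos) u 0
  | [], s, d, pos, hlen, hrel, hmem, u, hu => by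
    simpa [PySem.List.enumerate_nil] using hrel u hu
  | x :: rest, s, d, pos, hlen, hrel, hmem, u, hu => by
    simp only [PySem.List.enumerate_cons, List.foldl_cons]
    have hx := hmem x (by simp)
    refine pv_bisim n rest (s + 1) _ _ ?_ ?_ (fun y hy => hmem y (by simp [hy])) u hu
    · rw [PySem.List.pySetD_of_nonneg pos s hx.1]; simp [hlen]
    · intro v hv
      rw [PySem.Dict.getD_insert, PySem.List.pySetD_of_nonneg pos s hx.1,
        pv_pyGetD_nonneg 0 hv]
      by_cases hvx : v = x
      · subst hvx
        have hlt : v.toNat < pos.length := by omega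
        simp [List.getD_eq_getElem?_getD, List.getElem?_set, hlt]
      · have hne : x.toNat ≠ v.toNat := by omega
        rw [if_neg hvx]
        rw [hrel v hv, pv_pyGetD_nonneg 0 hv]
        simp [List.getD_eq_getElem?_getD, List.getElem?_set, hne]

lemma pv_lookup_eq (n : Nat) (root : Int) (rem : List Int)
    (hmem : ∀ x ∈ rem, 0 ≤ x ∧ x < (n : Int)) (u : Int) (hu : 0 ≤ u) :
    ((PySem.List.enumerate (root :: rem) 0).foldl
        (fun d p => d.insert p.2 p.1) PySem.Dict.empty).getD u 0
      = PySem.List.pyGetD (pvPOS n rem) u 0 := by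
  unfold pvPOS
  rw [pv_shift]
  simp only [PySem.List.enumerate_cons, List.foldl_cons, zero_add]
  refine pv_bisim n rem 1 _ _ (by simp) ?_ hmem u hu
  intro v hv
  rw [PySem.Dict.getD_insert, pv_pyGetD_nonneg 0 hv]
  simp [PySem.Dict.getD_empty, List.getD_eq_getElem?_getD, List.getElem?_replicate]
  split <;> simp

lemma pv_edges_mem {adjacency : List (List Int)} {lr : Int × Int}
    (h : lr ∈ pvEdgesFromAdjacency adjacency) : 0 ≤ lr.1 ∧ lr.1 < lr.2 := by
  simp only [pvEdgesFromAdjacency, List.mem_flatMap, List.mem_map, List.mem_filter] at h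
  obtain ⟨node, hnode, nb, ⟨_, hlt⟩, rfl⟩ := h
  rw [PySem.List.mem_pyRange_one] at hnode
  simp only [decide_eq_true_eq] at hlt
  exact ⟨hnode.1, hlt⟩

-- A's edge key in terms of the position array
lemma pv_key_eq (adjacency : List (List Int)) (root : Int) (rem : List Int)
    (hmem : ∀ x ∈ rem, 0 ≤ x ∧ x < (adjacency.length : Int)) :
    pvEdgeKeyAfterPermutation adjacency (root :: rem)
      = PySem.List.sorted2 (pvL adjacency.length (pvEdgesFromAdjacency adjacency) rem)
          Prod.fst Prod.snd false := by
  simp only [pvEdgeKeyAfterPermutation, pvL, pvRelabelF]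
  set D := (PySem.List.enumerate (root :: rem) 0).foldl
      (fun d p => d.insert p.2 p.1) PySem.Dict.empty with hD
  rw [PySem.List.foldl_append_singleton_eq_map
      (f := fun lr : Int × Int =>
        (min (D.getD lr.1 0) (D.getD lr.2 0), max (D.getD lr.1 0) (D.getD lr.2 0))),
    List.nil_append]
  refine congrArg (fun l => PySem.List.sorted2 l Prod.fst Prod.snd false) ?_
  refine List.map_congr_left ?_
  intro lr hlr
  obtain ⟨h1, h12⟩ := pv_edges_mem hlr
  have e1 : D.getD lr.1 0 = PySem.List.pyGetD (pvPOS adjacency.length rem) lr.1 0 := by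
    rw [hD]; exact pv_lookup_eq adjacency.length root rem hmem lr.1 h1
  have e2 : D.getD lr.2 0 = PySem.List.pyGetD (pvPOS adjacency.length rem) lr.2 0 := by
    rw [hD]; exact pv_lookup_eq adjacency.length root rem hmem lr.2 (by omega)
  rw [e1, e2]
  simp only [pvRelabelF, min_def, max_def]
  split_ifs <;> rfl

lemma pv_edges_bound {adjacency : List (List Int)} {lr : Int × Int}
    (hPre : ∀ p ∈ adjacency.zipIdx, ∀ v ∈ p.1, (p.2 : Int) < v → v < (adjacency.length : Int))
    (h : lr ∈ pvEdgesFromAdjacency adjacency) :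
    0 ≤ lr.1 ∧ lr.1 < lr.2 ∧ lr.2 < (adjacency.length : Int) := by
  simp only [pvEdgesFromAdjacency, List.mem_flatMap, List.mem_map, List.mem_filter] at h
  obtain ⟨node, hnode, nb, ⟨hnb, hlt⟩, rfl⟩ := h
  rw [PySem.List.mem_pyRange_one] at hnode
  simp only [decide_eq_true_eq] at hlt
  have hnn : node.toNat < adjacency.length := by omega
  have hrow : PySem.List.pyGetD adjacency node [] = adjacency[node.toNat] := by
    rw [pv_pyGetD_nonneg [] hnode.1, List.getD_eq_getElem?_getD,
      List.getElem?_eq_getElem hnn, Option.getD_some]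
  rw [hrow] at hnb
  have hz : (adjacency[node.toNat], node.toNat) ∈ adjacency.zipIdx :=
    List.mem_zipIdx_iff_getElem?.mpr (List.getElem?_eq_getElem hnn)
  have := hPre _ hz nb hnb (by rw [Int.toNat_of_nonneg hnode.1]; exact hlt)
  exact ⟨hnode.1, hlt, this⟩

lemma pv_edges_nil_mem {adjacency : List (List Int)} {lr : Int × Int}
    (hno : ∀ p ∈ adjacency.zipIdx, ∀ v ∈ p.1, ¬ ((p.2 : Int) < v))
    (h : lr ∈ pvEdgesFromAdjacency adjacency) : False := by
  simp only [pvEdgesFromAdjacency, List.mem_flatMap, List.mem_map, List.mem_filter] at h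
  obtain ⟨node, hnode, nb, ⟨hnb, hlt⟩, rfl⟩ := h
  rw [PySem.List.mem_pyRange_one] at hnode
  simp only [decide_eq_true_eq] at hlt
  have hnn : node.toNat < adjacency.length := by omega
  have hrow : PySem.List.pyGetD adjacency node [] = adjacency[node.toNat] := by
    rw [pv_pyGetD_nonneg [] hnode.1, List.getD_eq_getElem?_getD,
      List.getElem?_eq_getElem hnn, Option.getD_some]
  rw [hrow] at hnb
  have hz : (adjacency[node.toNat], node.toNat) ∈ adjacency.zipIdx :=
    List.mem_zipIdx_iff_getElem?.mpr (List.getElem?_eq_getElem hnn)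
  exact hno _ hz nb hnb (by rw [Int.toNat_of_nonneg hnode.1]; exact hlt)

lemma pv_self_mem_permutations : ∀ (xs : List Int), xs ∈ PySem.List.permutations xs xs.length
  | [] => by simp [PySem.List.permutations]
  | y :: ys => by
    rw [List.length_cons, PySem.List.permutations.eq_def]
    simp only [List.mem_flatMap]
    refine ⟨0, by simp, ?_⟩
    simpa using pv_self_mem_permutations ys

lemma pv_permutations_ne_nil (xs : List Int) :
    PySem.List.permutations xs xs.length ≠ [] :=
  List.ne_nil_of_mem (pv_self_mem_permutations xs)

-- ===== position array lookup characterisation =====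

lemma pv_pos_write : ∀ (rem : List Int) (s : Int) (pos : List Int) (u : Int),
    rem.Nodup → (∀ x ∈ rem, 0 ≤ x ∧ x.toNat < pos.length) → 0 ≤ u →
    PySem.List.pyGetD ((PySem.List.enumerate rem s).foldl
        (fun pos p => PySem.List.pySetD pos p.2 (p.1 + 1)) pos) u 0
      = if u ∈ rem then s + (List.idxOf u rem : Int) + 1 else PySem.List.pyGetD pos u 0
  | [], s, pos, u, _, _, _ => by simp [PySem.List.enumerate_nil]
  | x :: rest, s, pos, u, hN, hm, hu => by
    simp only [PySem.List.enumerate_cons, List.foldl_cons]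
    have hx := hm x List.mem_cons_self
    have hxm : x ∉ rest := (List.nodup_cons.mp hN).1
    rw [PySem.List.pySetD_of_nonneg pos _ hx.1]
    rw [pv_pos_write rest (s + 1) _ u (List.nodup_cons.mp hN).2
      (fun y hy => by have := hm y (List.mem_cons_of_mem _ hy); simpa using this) hu]
    by_cases hux : u = x
    · subst hux
      have h1 : u ∉ rest := hxm
      have h2 : u.toNat < pos.length := hx.2
      rw [if_neg h1, if_pos List.mem_cons_self, List.idxOf_cons_self,
        pv_pyGetD_nonneg (0 : Int) hu, List.getD_eq_getElem?_getD,
        List.getElem?_set_self]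
      · simp
      · exact h2
    · have hne : x.toNat ≠ u.toNat := by omega
      by_cases hur : u ∈ rest
      · rw [if_pos hur, if_pos (List.mem_cons_of_mem _ hur),
          List.idxOf_cons_ne _ (fun h => hux h.symm)]
        push_cast
        ring
      · have hnm : u ∉ x :: rest := by simp [hux, hur]
        rw [if_neg hur, if_neg hnm, pv_pyGetD_nonneg (0 : Int) hu,
          pv_pyGetD_nonneg (0 : Int) hu, List.getD_eq_getElem?_getD,
          List.getD_eq_getElem?_getD, List.getElem?_set_ne hne]

lemma pv_look (n : Nat) (rem : List Int) (hN : rem.Nodup)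
    (hm : ∀ x ∈ rem, 0 ≤ x ∧ x.toNat < n) (u : Int) (hu : 0 ≤ u) :
    PySem.List.pyGetD (pvPOS n rem) u 0
      = if u ∈ rem then (List.idxOf u rem : Int) + 1 else 0 := by
  unfold pvPOS
  rw [pv_pos_write rem 0 _ u hN (fun y hy => by have := hm y hy; simpa using this) hu]
  split
  · ring
  · rw [pv_pyGetD_nonneg (0 : Int) hu, List.getD_eq_getElem?_getD, List.getElem?_replicate]
    split <;> simp

-- ===== pairs list =====

lemma pv_mem_pairs {n : Int} {q : Int × Int} :
    q ∈ pvPairsL n ↔ 0 ≤ q.1 ∧ q.1 < q.2 ∧ q.2 < n := by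
  rcases q with ⟨a, b⟩
  simp only [pvPairsL, List.mem_flatMap, List.mem_map, PySem.List.mem_pyRange_one,
    Prod.mk.injEq]
  constructor
  · rintro ⟨a', ⟨h1, h2⟩, b', ⟨h3, h4⟩, rfl, rfl⟩
    exact ⟨h1, by omega, h4⟩
  · rintro ⟨h1, h2, h3⟩
    exact ⟨a, ⟨h1, by omega⟩, b, ⟨by omega, h3⟩, rfl, rfl⟩

lemma pv_pairwise_flatMap {α β : Type} (R : α → α → Prop) (S : β → β → Prop)
    (l : List α) (f : α → List β) (hl : l.Pairwise R) (hf : ∀ a, (f a).Pairwise S)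
    (hcross : ∀ a b, R a b → ∀ x ∈ f a, ∀ y ∈ f b, S x y) :
    (l.flatMap f).Pairwise S := by
  induction l with
  | nil => simp
  | cons a l ih =>
    rw [List.flatMap_cons, List.pairwise_append]
    refine ⟨hf a, ih (hl.sublist (List.sublist_cons_self a l)), ?_⟩
    intro x hx y hy
    obtain ⟨b, hb, hyb⟩ := List.mem_flatMap.mp hy
    exact hcross a b (List.rel_of_pairwise_cons hl hb) x hx y hyb

lemma pv_pairs_pairwise (n : Int) :
    (pvPairsL n).Pairwise (fun p q => pvPairLt p q = true) := by
  refine pv_pairwise_flatMap (fun a b => a < b) _ _ _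
    (PySem.List.pairwise_lt_pyRange_one 0 n) ?_ ?_
  · intro a
    rw [List.pairwise_map]
    refine (PySem.List.pairwise_lt_pyRange_one (a + 1) n).imp ?_
    intro x y h
    simp [pvPairLt, h]
  · intro a b hab x hx y hy
    obtain ⟨x', _, rfl⟩ := List.mem_map.mp hx
    obtain ⟨y', _, rfl⟩ := List.mem_map.mp hy
    simp [pvPairLt, hab]

lemma pv_pairs_nodup (n : Int) : (pvPairsL n).Nodup :=
  (pv_pairs_pairwise n).imp (fun h => pv_pairLt_ne h)

-- ===== sorted2 = grouped multiplicities =====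

lemma pv_sorted2_eq_foldl (L : List (Int × Int)) :
    PySem.List.sorted2 L Prod.fst Prod.snd false
      = L.foldl (fun acc x => PySem.List.insertBy pvPairLt x acc) [] := by
  have hbf : (fun (a b : Int × Int) =>
      (decide (a.1 < b.1) || (!decide (b.1 < a.1) && decide (a.2 < b.2)))) = pvPairLt := by
    funext a b
    rw [Bool.eq_iff_iff]
    simp [pvPairLt]
    omega
  simp only [PySem.List.sorted2]
  rw [if_neg (by simp), hbf]

lemma pv_insertBy_pairwise (x : Int × Int) :
    ∀ (ys : List (Int × Int)), ys.Pairwise (fun a b => pvPairLt b a = false) →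
    (PySem.List.insertBy pvPairLt x ys).Pairwise (fun a b => pvPairLt b a = false)
  | [], _ => by
    rw [PySem.List.insertBy]
    exact List.pairwise_singleton _ _
  | y :: ys, h => by
    rw [PySem.List.insertBy]
    by_cases hxy : pvPairLt x y = true
    · rw [if_pos hxy]
      refine List.pairwise_cons.mpr ⟨?_, h⟩
      intro z hz
      rcases List.mem_cons.mp hz with rfl | hz
      · exact pv_pairLt_asymm hxy
      · by_contra hzx
        have hzx' : pvPairLt z x = true := by
          cases hh : pvPairLt z x
          · exact absurd hh hzx
          · rfl
        have := pv_pairLt_trans hzx' hxy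
        have hzy := List.rel_of_pairwise_cons h hz
        rw [hzy] at this
        cases this
    · rw [if_neg hxy]
      refine List.pairwise_cons.mpr ⟨?_, pv_insertBy_pairwise x ys (List.Pairwise.of_cons h)⟩
      intro z hz
      rcases (PySem.List.mem_insertBy _ _ _ _).mp hz with rfl | hz
      · simpa using hxy
      · exact List.rel_of_pairwise_cons h hz

lemma pv_sorted2_pairwise (L : List (Int × Int)) :
    (PySem.List.sorted2 L Prod.fst Prod.snd false).Pairwise
      (fun a b => pvPairLt b a = false) := by
  rw [pv_sorted2_eq_foldl]
  have haux : ∀ (L acc : List (Int × Int)), acc.Pairwise (fun a b => pvPairLt b a = false) →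
      (L.foldl (fun acc x => PySem.List.insertBy pvPairLt x acc) acc).Pairwise
        (fun a b => pvPairLt b a = false) := by
    intro L
    induction L with
    | nil => intro acc h; exact h
    | cons x L ih =>
      intro acc h
      exact ih _ (pv_insertBy_pairwise x acc h)
  exact haux L [] (List.Pairwise.nil)

lemma pv_pairwise_le_eq_of_perm :
    ∀ (l1 l2 : List (Int × Int)), l1.Perm l2 →
    l1.Pairwise (fun a b => pvPairLt b a = false) →
    l2.Pairwise (fun a b => pvPairLt b a = false) → l1 = l2
  | [], l2, hp, _, _ => (hp.nil_eq).symm ▸ rfl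
  | a :: t1, l2, hp, h1, h2 => by
    have ha : a ∈ l2 := hp.mem_iff.mp List.mem_cons_self
    cases l2 with
    | nil => cases ha
    | cons b t2 =>
      by_cases hab : a = b
      · subst hab
        have := pv_pairwise_le_eq_of_perm t1 t2 hp.cons_inv
          (List.Pairwise.of_cons h1) (List.Pairwise.of_cons h2)
        rw [this]
      · exfalso
        have hat2 : a ∈ t2 := by
          rcases List.mem_cons.mp ha with h | h
          · exact absurd h hab
          · exact h
        have hbt1 : b ∈ t1 := by
          have hb : b ∈ a :: t1 := hp.mem_iff.mpr List.mem_cons_self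
          rcases List.mem_cons.mp hb with h | h
          · exact absurd h.symm hab
          · exact h
        have hba : pvPairLt b a = false := List.rel_of_pairwise_cons h1 hbt1
        have hab' : pvPairLt a b = false := List.rel_of_pairwise_cons h2 hat2
        rcases pv_pairLt_cases a b with h | h | h
        · rw [hab'] at h; cases h
        · exact hab h
        · rw [hba] at h; cases h

lemma pv_mem_rep {c : (Int × Int) → Nat} {P : List (Int × Int)} {x : Int × Int}
    (h : x ∈ pvRep c P) : x ∈ P := by
  obtain ⟨p, hp, hx⟩ := List.mem_flatMap.mp h
  rw [List.eq_of_mem_replicate hx]; exact hp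

lemma pv_rep_cons (c : (Int × Int) → Nat) (p : Int × Int) (P : List (Int × Int)) :
    pvRep c (p :: P) = List.replicate (c p) p ++ pvRep c P :=
  List.flatMap_cons ..

lemma pv_count_rep (c : (Int × Int) → Nat) :
    ∀ (P : List (Int × Int)), P.Nodup → ∀ q, (pvRep c P).count q = if q ∈ P then c q else 0
  | [], _, q => by simp [pvRep]
  | p :: P, hN, q => by
    rw [pv_rep_cons, List.count_append, List.count_replicate,
      pv_count_rep c P (List.nodup_cons.mp hN).2 q]
    have hpP : p ∉ P := (List.nodup_cons.mp hN).1
    by_cases hq : q = p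
    · subst hq
      simp [hpP]
    · simp [hq, Ne.symm hq, List.mem_cons]

lemma pv_rep_perm (P L : List (Int × Int)) (hN : P.Nodup)
    (hsub : ∀ x ∈ L, x ∈ P) : (pvRep (fun p => L.count p) P).Perm L := by
  rw [List.perm_iff_count]
  intro q
  rw [pv_count_rep _ P hN q]
  split
  · rfl
  · exact (List.count_eq_zero.mpr (fun hq => by simp_all [hsub q hq])).symm

lemma pv_rep_pairwise (c : (Int × Int) → Nat) :
    ∀ (P : List (Int × Int)), P.Pairwise (fun a b => pvPairLt a b = true) →
    (pvRep c P).Pairwise (fun a b => pvPairLt b a = false)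
  | [], _ => by simp [pvRep]
  | p :: P, h => by
    rw [pv_rep_cons, List.pairwise_append]
    refine ⟨List.pairwise_replicate.mpr (Or.inr (pv_pairLt_irrefl p)),
      pv_rep_pairwise c P (List.Pairwise.of_cons h), ?_⟩
    intro x hx y hy
    rw [List.eq_of_mem_replicate hx]
    exact pv_pairLt_asymm (List.rel_of_pairwise_cons h (pv_mem_rep hy))

lemma pv_sorted2_eq_rep (P L : List (Int × Int)) (hN : P.Nodup)
    (hPw : P.Pairwise (fun a b => pvPairLt a b = true)) (hsub : ∀ x ∈ L, x ∈ P) :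
    PySem.List.sorted2 L Prod.fst Prod.snd false = pvRep (fun p => L.count p) P := by
  refine pv_pairwise_le_eq_of_perm _ _ ?_ (pv_sorted2_pairwise L) (pv_rep_pairwise (fun p => L.count p) P hPw)
  exact (PySem.List.sorted2_perm L Prod.fst Prod.snd false).trans
    (pv_rep_perm P L hN hsub).symm

-- ===== the radix value =====

lemma pv_val_nonneg (base : Int) (hbase : 0 < base) (c : (Int × Int) → Nat) :
    ∀ (P : List (Int × Int)), 0 ≤ pvVal base c P := by
  intro P
  induction P with
  | nil => simp [pvVal]
  | cons p P ih =>
    have : (0 : Int) ≤ (c p : Int) * base ^ P.length :=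
      mul_nonneg (by positivity) (by positivity)
    simp only [pvVal]; omega

lemma pv_val_lt (base : Int) (hbase : 0 < base) (c : (Int × Int) → Nat) :
    ∀ (P : List (Int × Int)), (∀ p ∈ P, (c p : Int) < base) →
    pvVal base c P < base ^ P.length := by
  intro P
  induction P with
  | nil => simp [pvVal]
  | cons p P ih =>
    intro hb
    have h1 : pvVal base c P < base ^ P.length := ih (fun q hq => hb q (List.mem_cons_of_mem p hq))
    have h2 : (c p : Int) ≤ base - 1 := by have := hb p List.mem_cons_self; omega
    have h3 : (0 : Int) < base ^ P.length := by positivity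
    have h4 : (c p : Int) * base ^ P.length ≤ (base - 1) * base ^ P.length :=
      mul_le_mul_of_nonneg_right h2 (le_of_lt h3)
    simp only [pvVal, List.length_cons, pow_succ]
    nlinarith

lemma pv_foldl_val (base : Int) (c : (Int × Int) → Nat) :
    ∀ (P : List (Int × Int)) (a : Int),
    P.foldl (fun m p => m * base + (c p : Int)) a = a * base ^ P.length + pvVal base c P := by
  intro P
  induction P with
  | nil => intro a; simp [pvVal]
  | cons p P ih =>
    intro a
    simp only [List.foldl_cons, ih, pvVal, List.length_cons, pow_succ]
    ring

lemma pv_val_append (base : Int) (c : (Int × Int) → Nat) :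
    ∀ (P : List (Int × Int)) (p : Int × Int),
    pvVal base c (P ++ [p]) = pvVal base c P * base + (c p : Int) := by
  intro P
  induction P with
  | nil => intro p; simp [pvVal]
  | cons q P ih =>
    intro p
    simp only [List.cons_append, pvVal, ih, List.length_append, List.length_cons,
      List.length_nil, pow_succ, pow_add]
    ring

lemma pv_keyLt_replicate (p : Int × Int) :
    ∀ (k : Nat) (A B : List (Int × Int)),
    pvKeyLt (List.replicate k p ++ A) (List.replicate k p ++ B) = pvKeyLt A B := by
  intro k
  induction k with
  | zero => intro A B; simp
  | succ k ih =>
    intro A B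
    simp [List.replicate_succ, pvKeyLt, pv_pairLt_irrefl, ih]

-- the heart: lexicographic comparison of grouped keys = comparison of radix values
lemma pv_cmp (base : Int) (hbase : 0 < base) :
    ∀ (P : List (Int × Int)), P.Pairwise (fun a b => pvPairLt a b = true) →
    ∀ (c1 c2 : (Int × Int) → Nat), (∀ p ∈ P, (c1 p : Int) < base) →
    (∀ p ∈ P, (c2 p : Int) < base) →
    (pvRep c1 P).length = (pvRep c2 P).length →
    pvKeyLt (pvRep c1 P) (pvRep c2 P) = decide (pvVal base c2 P < pvVal base c1 P) := by
  intro P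
  induction P with
  | nil => intro _ c1 c2 _ _ _; simp [pvRep, pvVal, pvKeyLt]
  | cons p P ih =>
    intro hPw c1 c2 hb1 hb2 hlen
    have hb1' : ∀ q ∈ P, (c1 q : Int) < base := fun q hq => hb1 q (List.mem_cons_of_mem p hq)
    have hb2' : ∀ q ∈ P, (c2 q : Int) < base := fun q hq => hb2 q (List.mem_cons_of_mem p hq)
    have hlen' : c1 p + (pvRep c1 P).length = c2 p + (pvRep c2 P).length := by
      rw [pv_rep_cons, pv_rep_cons] at hlen
      simpa using hlen
    have hW : (0 : Int) < base ^ P.length := pow_pos hbase _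
    have hv1lt := pv_val_lt base hbase c1 P hb1'
    have hv2lt := pv_val_lt base hbase c2 P hb2'
    have hv1nn := pv_val_nonneg base hbase c1 P
    have hv2nn := pv_val_nonneg base hbase c2 P
    rcases Nat.lt_trichotomy (c1 p) (c2 p) with hc | hc | hc
    · -- c1 p < c2 p : left key is LARGER (first difference has a later pair), value smaller
      rw [pv_rep_cons, pv_rep_cons,
        show c2 p = c1 p + ((c2 p - c1 p - 1) + 1) by omega,
        List.replicate_add, List.append_assoc, pv_keyLt_replicate, List.replicate_succ,
        List.cons_append]
      have hlnz : (pvRep c1 P).length = (c2 p - c1 p) + (pvRep c2 P).length := by omega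
      cases hL : pvRep c1 P with
      | nil => rw [hL] at hlnz; simp at hlnz; omega
      | cons q t =>
        have hq : q ∈ P := pv_mem_rep (hL ▸ List.mem_cons_self)
        have hpq : pvPairLt p q = true := List.rel_of_pairwise_cons hPw hq
        have hKL : pvKeyLt (q :: t)
            (p :: (List.replicate (c2 p - c1 p - 1) p ++ pvRep c2 P)) = false := by
          simp [pvKeyLt, pv_pairLt_asymm hpq, (pv_pairLt_ne hpq).symm]
        rw [hKL]
        have hcc : (c1 p : Int) + 1 ≤ (c2 p : Int) := by exact_mod_cast hc
        have hineq : ¬ (pvVal base c2 (p :: P) < pvVal base c1 (p :: P)) := by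
          simp only [pvVal]
          nlinarith
        simp [hineq]
    · -- equal digit: strip and recurse
      rw [pv_rep_cons, pv_rep_cons, hc, pv_keyLt_replicate,
        ih (List.Pairwise.of_cons hPw) c1 c2 hb1' hb2' (by omega)]
      simp only [pvVal, hc]
      rw [decide_eq_decide]
      omega
    · -- c1 p > c2 p : left key is smaller, value larger
      rw [pv_rep_cons, pv_rep_cons,
        show c1 p = c2 p + ((c1 p - c2 p - 1) + 1) by omega,
        List.replicate_add, List.append_assoc, pv_keyLt_replicate, List.replicate_succ,
        List.cons_append]
      have hlnz : (pvRep c2 P).length = (c1 p - c2 p) + (pvRep c1 P).length := by omega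
      cases hL : pvRep c2 P with
      | nil => rw [hL] at hlnz; simp at hlnz; omega
      | cons q t =>
        have hq : q ∈ P := pv_mem_rep (hL ▸ List.mem_cons_self)
        have hpq : pvPairLt p q = true := List.rel_of_pairwise_cons hPw hq
        have hKL : pvKeyLt
            (p :: (List.replicate (c1 p - c2 p - 1) p ++ pvRep c1 P)) (q :: t) = true := by
          simp [pvKeyLt, hpq]
        rw [hKL]
        have hcc : (c2 p : Int) + 1 ≤ (c1 p : Int) := by exact_mod_cast hc
        have hineq : pvVal base c2 (p :: P) < pvVal base c1 (p :: P) := by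
          simp only [pvVal]
          nlinarith
        simp [hineq]

-- decoding the radix value recovers the grouped key
lemma pv_decode (base : Int) (hbase : 0 < base) (c : (Int × Int) → Nat) :
    ∀ (P : List (Int × Int)), (∀ p ∈ P, (c p : Int) < base) →
    ∀ (k : List (Int × Int)),
    P.reverse.foldl
        (fun (st : Int × List (Int × Int)) p =>
          (PySem.Int.floordiv st.1 base,
            List.replicate (PySem.Int.mod st.1 base).toNat p ++ st.2))
        (pvVal base c P, k)
      = (0, pvRep c P ++ k) := by
  intro P
  induction P using List.reverseRecOn with
  | nil => intro _ k; simp [pvVal, pvRep]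
  | append_singleton P p ih =>
    intro hb k
    have hcp : (0 : Int) ≤ (c p : Int) ∧ (c p : Int) < base :=
      ⟨by positivity, hb p (List.mem_append_right P List.mem_cons_self)⟩
    simp only [List.reverse_append, List.reverse_cons, List.reverse_nil, List.nil_append,
      List.singleton_append, List.foldl_cons]
    rw [pv_val_append]
    have h1 : PySem.Int.floordiv (pvVal base c P * base + (c p : Int)) base = pvVal base c P := by
      rw [PySem.Int.floordiv_eq_ediv_of_pos hbase, add_comm,
        Int.add_mul_ediv_right _ _ (ne_of_gt hbase),
        Int.ediv_eq_zero_of_lt hcp.1 hcp.2, zero_add]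
    have h2 : (PySem.Int.mod (pvVal base c P * base + (c p : Int)) base).toNat = c p := by
      rw [PySem.Int.mod_eq_emod_of_pos hbase, add_comm, mul_comm,
        Int.add_mul_emod_self_left, Int.emod_eq_of_lt hcp.1 hcp.2, Int.toNat_natCast]
    rw [h1, h2, ih (fun q hq => hb q (List.mem_append_left _ hq)) (List.replicate (c p) p ++ k)]
    rw [show pvRep c (P ++ [p]) = pvRep c P ++ List.replicate (c p) p from by
      simp [pvRep, List.flatMap_append]]
    rw [List.append_assoc]

-- ===== the two accumulator loops pick the same winner =====

lemma pv_fold_choice_mem (V : List Int → Int) :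
    ∀ (rs : List (List Int)) (b : List Int),
    rs.foldl (fun m r => if V m < V r then r else m) b ∈ b :: rs := by
  intro rs
  induction rs with
  | nil => intro b; simp
  | cons r rs ih =>
    intro b
    simp only [List.foldl_cons]
    by_cases h : V b < V r
    · simp only [h, if_pos]
      rcases List.mem_cons.mp (ih r) with h' | h' <;> simp_all
    · simp only [h, if_neg, not_false_iff]
      rcases List.mem_cons.mp (ih b) with h' | h' <;> simp_all

lemma pv_pairloop (n : Int) (K : List Int → List (Int × Int)) (V : List Int → Int) :
    ∀ (rs : List (List Int)) (b : List Int),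
    (∀ r r', (r = b ∨ r ∈ rs) → (r' = b ∨ r' ∈ rs) →
      pvKeyLt (K r) (K r') = decide (V r' < V r)) →
    rs.foldl (fun s r => pvStep n s (K r))
        (some (K b), some (pvAdjacencyFromEdgeKey n (K b)))
      = (some (K (rs.foldl (fun m r => if V m < V r then r else m) b)),
          some (pvAdjacencyFromEdgeKey n (K (rs.foldl (fun m r => if V m < V r then r else m) b))))
    ∧ rs.foldl (fun m r => if m < V r then V r else m) (V b)
      = V (rs.foldl (fun m r => if V m < V r then r else m) b)
  | [], b, _ => ⟨rfl, rfl⟩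
  | r :: rs, b, H => by
    have hcmp := H r b (Or.inr List.mem_cons_self) (Or.inl rfl)
    have hstepA : pvStep n (some (K b), some (pvAdjacencyFromEdgeKey n (K b))) (K r)
        = if V b < V r then (some (K r), some (pvAdjacencyFromEdgeKey n (K r)))
          else (some (K b), some (pvAdjacencyFromEdgeKey n (K b))) := by
      simp only [pvStep, pv_keyGe_eq_not_keyLt, hcmp]
      by_cases h : V b < V r
      · simp [h]
      · simp [h]
    have H' : ∀ b', (b' = b ∨ b' = r) →
        ∀ r1 r2, (r1 = b' ∨ r1 ∈ rs) → (r2 = b' ∨ r2 ∈ rs) →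
        pvKeyLt (K r1) (K r2) = decide (V r2 < V r1) := by
      rintro b' hb' r1 r2 h1 h2
      refine H r1 r2 ?_ ?_
      · rcases h1 with rfl | h1
        · rcases hb' with rfl | rfl
          · exact Or.inl rfl
          · exact Or.inr List.mem_cons_self
        · exact Or.inr (List.mem_cons_of_mem _ h1)
      · rcases h2 with rfl | h2
        · rcases hb' with rfl | rfl
          · exact Or.inl rfl
          · exact Or.inr List.mem_cons_self
        · exact Or.inr (List.mem_cons_of_mem _ h2)
    simp only [List.foldl_cons, hstepA]
    by_cases h : V b < V r
    · rw [if_pos h, if_pos h, if_pos h]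
      exact pv_pairloop n K V rs r (H' r (Or.inr rfl))
    · rw [if_neg h, if_neg h, if_neg h]
      exact pv_pairloop n K V rs b (H' b (Or.inl rfl))

-- ===== adjacency reconstruction (shared final step) =====

def pvRowStep (i : Nat) (s : PySem.Set Int) (lr : Int × Int) : PySem.Set Int :=
  let s1 := if lr.1.toNat = i then PySem.Set.add s lr.2 else s
  if lr.2.toNat = i then PySem.Set.add s1 lr.1 else s1

lemma pv_foldadj_getElem? : ∀ (key : List (Int × Int)) (sets : List (PySem.Set Int)) (i : Nat),
    (key.foldl (fun sets lr =>
        (sets.modify lr.1.toNat (fun s => PySem.Set.add s lr.2)).modify lr.2.toNat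
          (fun s => PySem.Set.add s lr.1)) sets)[i]?
      = (sets[i]?).map (fun s0 => key.foldl (pvRowStep i) s0)
  | [], sets, i => by simp
  | lr :: rest, sets, i => by
    simp only [List.foldl_cons]
    rw [pv_foldadj_getElem? rest]
    rw [List.getElem?_modify, List.getElem?_modify]
    cases h : sets[i]? with
    | none => simp
    | some s0 => simp [pvRowStep, eq_comm]

lemma pv_stepfold_eq (i : Nat) :
    ∀ (key : List (Int × Int)) (s : PySem.Set Int), (∀ p ∈ key, 0 ≤ p.1 ∧ 0 ≤ p.2) →
    key.foldl (pvRowStep i) s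
      = ((key.filter (fun p => p.1 == (i : Int) || p.2 == (i : Int))).map
          (fun p => if p.1 == (i : Int) then p.2 else p.1)).foldl PySem.Set.add s
  | [], s, h => rfl
  | lr :: rest, s, h => by
    have h1 := (h lr (List.mem_cons_self)).1
    have h2 := (h lr (List.mem_cons_self)).2
    have ht1 : (lr.1.toNat = i) ↔ lr.1 = (i : Int) := by omega
    have ht2 : (lr.2.toNat = i) ↔ lr.2 = (i : Int) := by omega
    have ih := fun s' => pv_stepfold_eq i rest s' (fun p hp => h p (List.mem_cons_of_mem lr hp))
    by_cases c1 : lr.1 = (i : Int) <;> by_cases c2 : lr.2 = (i : Int)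
    · have hc : lr.1 = lr.2 := by rw [c1, c2]
      have hs : pvRowStep i s lr = PySem.Set.add s lr.2 := by
        simp only [pvRowStep, if_pos (ht1.mpr c1), if_pos (ht2.mpr c2)]
        exact PySem.Set.add_of_mem ((PySem.Set.mem_add _ _ _).mpr (Or.inr hc))
      have hv : (if (lr.1 == (i : Int)) = true then lr.2 else lr.1) = lr.2 := by simp [c1]
      rw [List.foldl_cons, hs, List.filter_cons_of_pos (by simp [c1]), List.map_cons,
        List.foldl_cons, hv]
      exact ih _
    · have hs : pvRowStep i s lr = PySem.Set.add s lr.2 := by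
        simp only [pvRowStep, if_pos (ht1.mpr c1),
          if_neg (fun hh => c2 (ht2.mp hh))]
      have hv : (if (lr.1 == (i : Int)) = true then lr.2 else lr.1) = lr.2 := by simp [c1]
      rw [List.foldl_cons, hs, List.filter_cons_of_pos (by simp [c1]), List.map_cons,
        List.foldl_cons, hv]
      exact ih _
    · have hs : pvRowStep i s lr = PySem.Set.add s lr.1 := by
        simp only [pvRowStep, if_neg (fun hh => c1 (ht1.mp hh)), if_pos (ht2.mpr c2)]
      have hv : (if (lr.1 == (i : Int)) = true then lr.2 else lr.1) = lr.1 := by simp [c1]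
      rw [List.foldl_cons, hs, List.filter_cons_of_pos (by simp [c2]), List.map_cons,
        List.foldl_cons, hv]
      exact ih _
    · have hs : pvRowStep i s lr = s := by
        simp only [pvRowStep, if_neg (fun hh => c1 (ht1.mp hh)),
          if_neg (fun hh => c2 (ht2.mp hh))]
      rw [List.foldl_cons, hs, List.filter_cons_of_neg (by simp [c1, c2])]
      exact ih _

lemma pv_adj_eq (nN : Nat) (key : List (Int × Int))
    (h : ∀ p ∈ key, 0 ≤ p.1 ∧ 0 ≤ p.2) :
    pvAdjacencyFromEdgeKey (nN : Int) key
      = (PySem.List.pyRange 0 (nN : Int) 1).map (fun w =>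
          PySem.List.sorted
            (PySem.Set.ofList ((key.filter (fun p => p.1 == w || p.2 == w)).map
              (fun p => if p.1 == w then p.2 else p.1)))
            (fun x => x) false) := by
  simp only [pvAdjacencyFromEdgeKey]
  apply List.ext_getElem?
  intro i
  rw [List.getElem?_map, List.getElem?_map, pv_foldadj_getElem?, List.getElem?_map,
    Option.map_map, Option.map_map]
  cases hlt : (PySem.List.pyRange 0 (nN : Int) 1)[i]? with
  | none => simp
  | some w =>
    have hi : i < (PySem.List.pyRange 0 (nN : Int) 1).length := by
      by_contra hc
      rw [List.getElem?_eq_none (le_of_not_gt hc)] at hlt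
      cases hlt
    have hw : w = (i : Int) := by
      rw [List.getElem?_eq_getElem hi] at hlt
      have hv := PySem.List.getElem_pyRange_one 0 (nN : Int) i hi
      injection hlt with hlt'
      rw [← hlt', hv]; ring
    simp only [Option.map_some, Function.comp, hw]
    rw [pv_stepfold_eq i key _ h]
    rw [show PySem.Set.ofList ((key.filter (fun p => p.1 == (i : Int) || p.2 == (i : Int))).map
        (fun p => if p.1 == (i : Int) then p.2 else p.1))
      = ((key.filter (fun p => p.1 == (i : Int) || p.2 == (i : Int))).map
        (fun p => if p.1 == (i : Int) then p.2 else p.1)).foldl PySem.Set.add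
          PySem.Set.empty from PySem.Set.ofList_eq_foldl _]

-- ===== main equivalence =====

-- B's per-permutation mask equals the radix value of the relabelled multiplicities
lemma pv_mask_eq (nN : Nat) (E : List (Int × Int)) (rem : List Int) :
    (pvPairsL (nN : Int)).foldl (fun m p => m * ((E.length : Int) + 1) +
      (E.foldl (fun d uv =>
        let a := PySem.List.pyGetD ((PySem.List.enumerate rem 0).foldl
          (fun pos p => PySem.List.pySetD pos p.2 (p.1 + 1))
          (List.replicate nN (0 : Int))) uv.1 0
        let b := PySem.List.pyGetD ((PySem.List.enumerate rem 0).foldl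
          (fun pos p => PySem.List.pySetD pos p.2 (p.1 + 1))
          (List.replicate nN (0 : Int))) uv.2 0
        let p := if a ≤ b then (a, b) else (b, a)
        d.insert p (d.getD p 0 + 1)) (PySem.Dict.empty : PySem.Dict (Int × Int) Int)).getD p 0)
      (0 : Int)
    = pvVal ((E.length : Int) + 1) (fun p => (pvL nN E rem).count p) (pvPairsL (nN : Int)) := by
  have h1 : E.foldl (fun d uv =>
        let a := PySem.List.pyGetD ((PySem.List.enumerate rem 0).foldl
          (fun pos p => PySem.List.pySetD pos p.2 (p.1 + 1))
          (List.replicate nN (0 : Int))) uv.1 0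
        let b := PySem.List.pyGetD ((PySem.List.enumerate rem 0).foldl
          (fun pos p => PySem.List.pySetD pos p.2 (p.1 + 1))
          (List.replicate nN (0 : Int))) uv.2 0
        let p := if a ≤ b then (a, b) else (b, a)
        d.insert p (d.getD p 0 + 1)) (PySem.Dict.empty : PySem.Dict (Int × Int) Int)
      = PySem.Dict.counter (pvL nN E rem) := by
    have h2 : (pvL nN E rem).foldl (fun d x => d.insert x (d.getD x 0 + 1))
        (PySem.Dict.empty : PySem.Dict (Int × Int) Int)
        = PySem.Dict.counter (pvL nN E rem) :=
      PySem.Dict.foldl_insert_getD_add_one_eq_counter _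
    rw [← h2, pvL, List.foldl_map]
    rfl
  rw [h1]
  rw [PySem.List.foldl_congr_mem _ _
    (fun (m : Int) (p : Int × Int) => m * ((E.length : Int) + 1)
      + (((pvL nN E rem).count p : Nat) : Int)) _
    (fun acc p _ => by rw [PySem.Dict.getD_counter])]
  rw [pv_foldl_val ((E.length : Int) + 1) (fun p => (pvL nN E rem).count p)]
  simp

theorem pv_main (adjacency : List (List Int)) (root : Int)
    (hPre : Pre_rooted_canonical_form adjacency root) :
    rooted_canonical_form adjacency root = rooted_canonical_form_alt adjacency root := by
  obtain ⟨hbnd, hdisj⟩ := hPre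
  simp only [rooted_canonical_form, rooted_canonical_form_alt, Int.toNat_natCast]
  rw [show (PySem.List.pyRange 0 (adjacency.length : Int) 1).flatMap (fun u =>
      ((PySem.List.pyGetD adjacency u []).filter (fun v => decide (u < v))).map
        (fun v => (u, v))) = pvEdgesFromAdjacency adjacency from rfl]
  rw [show (PySem.List.pyRange 0 (adjacency.length : Int) 1).flatMap (fun a =>
      (PySem.List.pyRange (a + 1) (adjacency.length : Int) 1).map (fun b => (a, b)))
      = pvPairsL (adjacency.length : Int) from rfl]
  set n : Int := (adjacency.length : Int) with hn
  set E := pvEdgesFromAdjacency adjacency with hE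
  set P := pvPairsL n with hP
  set base : Int := (E.length : Int) + 1 with hbase0
  have hbase : 0 < base := by rw [hbase0]; positivity
  set others := (PySem.List.pyRange 0 n 1).filter (fun node => decide (node ≠ root)) with hO
  set PS := PySem.List.permutations others others.length with hPS
  -- per-permutation data
  set cnt : List Int → (Int × Int) → Nat := fun rem p => (pvL adjacency.length E rem).count p
    with hcnt
  set K : List Int → List (Int × Int) := fun rem => pvRep (cnt rem) P with hK
  set V : List Int → Int := fun rem => pvVal base (cnt rem) P with hV
  have hothers : ∀ x, x ∈ others ↔ ((0 ≤ x ∧ x < n) ∧ x ≠ root) := by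
    intro x
    rw [hO, List.mem_filter, PySem.List.mem_pyRange_one]
    simp
  have hothnd : others.Nodup := (PySem.List.nodup_pyRange_one 0 n).filter _
  -- facts about any permutation in the stream
  have hGood : ∀ rem ∈ PS, ∀ q ∈ pvL adjacency.length E rem, q ∈ P ∧ 0 ≤ q.1 ∧ 0 ≤ q.2 := by
    intro rem hrem q hq
    obtain ⟨uv, huv, rfl⟩ := List.mem_map.mp hq
    rcases hdisj with hroot | hnofwd
    swap
    · exact absurd (pv_edges_nil_mem hnofwd (hE ▸ huv)) not_false
    have hperm : rem.Perm others := PySem.List.perm_of_mem_permutations (hPS ▸ hrem)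
    have hremnd : rem.Nodup := hperm.nodup_iff.mpr hothnd
    have hmemr : ∀ x, x ∈ rem ↔ ((0 ≤ x ∧ x < n) ∧ x ≠ root) := by
      intro x; rw [hperm.mem_iff]; exact hothers x
    have hmr : ∀ x ∈ rem, 0 ≤ x ∧ x.toNat < adjacency.length := by
      intro x hx
      have := (hmemr x).mp hx
      omega
    have hrnr : root ∉ rem := fun h => ((hmemr root).mp h).2 rfl
    have hsub : root :: rem ⊆ PySem.List.pyRange 0 n 1 := by
      intro x hx
      rw [PySem.List.mem_pyRange_one]
      rcases List.mem_cons.mp hx with rfl | hx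
      · exact hroot
      · exact ((hmemr x).mp hx).1
    have hlensub : rem.length + 1 ≤ adjacency.length := by
      have hnd : (root :: rem).Nodup := List.nodup_cons.mpr ⟨hrnr, hremnd⟩
      have := (hnd.subperm hsub).length_le
      rw [PySem.List.length_pyRange_one] at this
      simp only [List.length_cons] at this
      omega
    have hlook : ∀ u, 0 ≤ u → u < n →
        0 ≤ PySem.List.pyGetD (pvPOS adjacency.length rem) u 0 ∧
        PySem.List.pyGetD (pvPOS adjacency.length rem) u 0 < n := by
      intro u hu1 hu2
      rw [pv_look adjacency.length rem hremnd hmr u hu1]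
      split
      · rename_i hm
        have := List.idxOf_lt_length_of_mem hm
        omega
      · omega
    have hcover : ∀ u, 0 ≤ u → u < n → u ∉ rem → u = root := by
      intro u h1 h2 hnm
      by_contra hne
      exact hnm ((hmemr u).mpr ⟨⟨h1, h2⟩, hne⟩)
    have hinj : ∀ u v, 0 ≤ u → u < n → 0 ≤ v → v < n → u ≠ v →
        PySem.List.pyGetD (pvPOS adjacency.length rem) u 0 ≠
        PySem.List.pyGetD (pvPOS adjacency.length rem) v 0 := by
      intro u v hu1 hu2 hv1 hv2 huv
      rw [pv_look adjacency.length rem hremnd hmr u hu1,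
        pv_look adjacency.length rem hremnd hmr v hv1]
      by_cases hum : u ∈ rem <;> by_cases hvm : v ∈ rem
      · rw [if_pos hum, if_pos hvm]
        intro hcon
        have hidx : List.idxOf u rem = List.idxOf v rem := by omega
        have h1 : rem[List.idxOf u rem]? = some u := by
          rw [List.getElem?_eq_getElem (List.idxOf_lt_length_of_mem hum), List.getElem_idxOf]
        have h2 : rem[List.idxOf v rem]? = some v := by
          rw [List.getElem?_eq_getElem (List.idxOf_lt_length_of_mem hvm), List.getElem_idxOf]
        rw [hidx, h2] at h1
        exact huv (Option.some.inj h1).symm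
      · rw [if_pos hum, if_neg hvm]
        have := List.idxOf_lt_length_of_mem hum
        omega
      · rw [if_neg hum, if_pos hvm]
        have := List.idxOf_lt_length_of_mem hvm
        omega
      · exact absurd ((hcover u hu1 hu2 hum).trans (hcover v hv1 hv2 hvm).symm) huv
    obtain ⟨hu0, huvlt, hvn⟩ := pv_edges_bound hbnd (hE ▸ huv)
    have hv0 : (0 : Int) ≤ uv.2 := by omega
    have hla := hlook uv.1 hu0 (by omega)
    have hlb := hlook uv.2 hv0 hvn
    have hne := hinj uv.1 uv.2 hu0 (by omega) hv0 hvn (by omega)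
    simp only [pvRelabelF]
    split
    · rename_i hle
      refine ⟨pv_mem_pairs.mpr ?_, by simpa using hla.1, by simpa using hlb.1⟩
      refine ⟨by simpa using hla.1, ?_, by simpa using hlb.2⟩
      simp only []
      omega
    · rename_i hle
      refine ⟨pv_mem_pairs.mpr ?_, by simpa using hlb.1, by simpa using hla.1⟩
      refine ⟨by simpa using hlb.1, ?_, by simpa using hla.2⟩
      simp only []
      omega
  have hPnd : P.Nodup := hP ▸ pv_pairs_nodup n
  have hPpw : P.Pairwise (fun a b => pvPairLt a b = true) := hP ▸ pv_pairs_pairwise n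
  have hcntlt : ∀ rem, ∀ p, ((cnt rem p : Nat) : Int) < base := by
    intro rem p
    have h1 : cnt rem p ≤ (pvL adjacency.length E rem).length := List.count_le_length
    have h2 : (pvL adjacency.length E rem).length = E.length := List.length_map ..
    rw [hbase0]
    omega
  have hKperm : ∀ rem ∈ PS, (K rem).Perm (pvL adjacency.length E rem) := by
    intro rem hrem
    exact pv_rep_perm P _ hPnd (fun x hx => (hGood rem hrem x hx).1)
  have hKlen : ∀ rem ∈ PS, (K rem).length = E.length := by
    intro rem hrem
    rw [(hKperm rem hrem).length_eq]
    exact List.length_map ..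
  have hcmp : ∀ r ∈ PS, ∀ r' ∈ PS, pvKeyLt (K r) (K r') = decide (V r' < V r) := by
    intro r hr r' hr'
    exact pv_cmp base hbase P hPpw (cnt r) (cnt r') (fun p _ => hcntlt r p)
      (fun p _ => hcntlt r' p) (by rw [hKlen r hr, hKlen r' hr'])
  have hKeyA : ∀ rem ∈ PS, pvEdgeKeyAfterPermutation adjacency (root :: rem) = K rem := by
    intro rem hrem
    have hperm : rem.Perm others := PySem.List.perm_of_mem_permutations (hPS ▸ hrem)
    have hmem : ∀ x ∈ rem, 0 ≤ x ∧ x < (adjacency.length : Int) := by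
      intro x hx
      have := (hothers x).mp (hperm.mem_iff.mp hx)
      exact ⟨this.1.1, this.1.2⟩
    rw [pv_key_eq adjacency root rem hmem, hK]
    exact pv_sorted2_eq_rep P _ hPnd hPpw (fun x hx => (hGood rem hrem x hx).1)
  -- rewrite A's loop
  rw [PySem.List.foldl_congr_mem PS _ (fun best rem => pvStep n best (K rem)) _
    (fun acc rem hrem => by rw [hKeyA rem hrem])]
  -- rewrite B's loop
  rw [PySem.List.foldl_congr_mem PS _ (fun (best : Int) rem => if best < V rem then V rem else best) _
    (fun acc rem hrem => by
      simp only []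
      rw [hbase0, hP, hn]
      rw [pv_mask_eq adjacency.length E rem])]
  -- both loops now walk the same stream; pick the winner
  cases hPScases : PS with
  | nil => exact absurd (hPS ▸ hPScases) (pv_permutations_ne_nil others)
  | cons r0 rest =>
    have hr0 : r0 ∈ PS := by rw [hPScases]; exact List.mem_cons_self
    simp only [List.foldl_cons]
    have hfirstA : pvStep n ((none, none) :
        Option (List (Int × Int)) × Option (List (List Int))) (K r0)
        = (some (K r0), some (pvAdjacencyFromEdgeKey n (K r0))) := rfl
    have hfirstB : (if (-1 : Int) < V r0 then V r0 else -1) = V r0 := by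
      have hv0 : 0 ≤ V r0 := pv_val_nonneg base hbase (cnt r0) P
      rw [if_pos (by omega)]
    rw [hfirstA, hfirstB]
    have hmemPS : ∀ r, (r = r0 ∨ r ∈ rest) → r ∈ PS := by
      intro r hr
      rw [hPScases]
      rcases hr with rfl | hr
      · exact List.mem_cons_self
      · exact List.mem_cons_of_mem _ hr
    obtain ⟨hAf, hBf⟩ := pv_pairloop n K V rest r0
      (fun r r' h h' => hcmp r (hmemPS r h) r' (hmemPS r' h'))
    rw [hAf, hBf]
    set w := rest.foldl (fun m r => if V m < V r then r else m) r0 with hw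
    have hwPS : w ∈ PS := by
      rw [hPScases]
      exact pv_fold_choice_mem V rest r0
    have hdec : P.reverse.foldl
        (fun (st : Int × List (Int × Int)) p =>
          (PySem.Int.floordiv st.1 base,
            List.replicate (PySem.Int.mod st.1 base).toNat p ++ st.2))
        (V w, ([] : List (Int × Int)))
        = (0, K w ++ []) := pv_decode base hbase (cnt w) P (fun p _ => hcntlt w p) []
    have hKnn : ∀ p ∈ K w, 0 ≤ p.1 ∧ 0 ≤ p.2 := by
      intro p hp
      have := hGood w hwPS p ((hKperm w hwPS).mem_iff.mp hp)
      exact ⟨this.2.1, this.2.2⟩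
    have hadj : pvAdjacencyFromEdgeKey n (K w)
        = (PySem.List.pyRange 0 n 1).map (fun ww =>
            PySem.List.sorted
              (PySem.Set.ofList (((K w).filter (fun p => p.1 == ww || p.2 == ww)).map
                (fun p => if p.1 == ww then p.2 else p.1)))
              (fun x => x) false) := by
      rw [hn]
      exact pv_adj_eq adjacency.length (K w) hKnn
    simp only [Option.getD_some]
    rw [hdec]
    simp only [List.append_nil]
    rw [hadj]

-- ===== VERDICT (by name: the statement is the Claim_ definition above) =====
theorem rooted_canonical_form_spec : Claim_equal_rooted_canonical_form := by
  intro adjacency root _ hPre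
  unfold Spec_rooted_canonical_form
  exact pv_main adjacency root hPre
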